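-- pv_equiv track=rewrite | github.com/Assaf-Alon/advent-of-code-2024 | day09/sol.py | get_free_blocks_by_size
-- ===== SOURCE A (Python) =====
-- from typing import DefaultDict, List, Optional, Tuple
--
-- def get_free_blocks_by_size(arr: List[int]) -> List[List[int]]:
--     free_blocks_by_size = [list() for _ in range(10)]
--     block_index_start = 0
--     for i in range(1, len(arr), 2):
--         prev = arr[i - 1]
--         curr = arr[i]
--         block_index_start += prev
--         free_blocks_by_size[curr].append(block_index_start)
--         block_index_start += curr
--     return free_blocks_by_size
-- ===== SOURCE B (Python) =====
-- def get_free_blocks_by_size(arr):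
--     # Two-pass decomposition: build the prefix-sum table first, then bucket the
--     # odd-index (free-block) entries by size, looking their start index up in the table.
--     prefix = [0]
--     for x in arr:
--         prefix.append(prefix[-1] + x)
--     free_blocks_by_size = [[] for _ in range(10)]
--     for i in range(1, len(arr), 2):
--         free_blocks_by_size[arr[i]].append(prefix[i])
--     return free_blocks_by_size
-- ===== Notes on version B (the rewrite author's own statement) =====
-- stated objective: alternative
-- what changed: Replaces A's single loop that threads a running block_index_start accumulator with two separate passes: one building a prefix-sum table, one bucketing the odd-index entries by table lookup.
import Mathlib
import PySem

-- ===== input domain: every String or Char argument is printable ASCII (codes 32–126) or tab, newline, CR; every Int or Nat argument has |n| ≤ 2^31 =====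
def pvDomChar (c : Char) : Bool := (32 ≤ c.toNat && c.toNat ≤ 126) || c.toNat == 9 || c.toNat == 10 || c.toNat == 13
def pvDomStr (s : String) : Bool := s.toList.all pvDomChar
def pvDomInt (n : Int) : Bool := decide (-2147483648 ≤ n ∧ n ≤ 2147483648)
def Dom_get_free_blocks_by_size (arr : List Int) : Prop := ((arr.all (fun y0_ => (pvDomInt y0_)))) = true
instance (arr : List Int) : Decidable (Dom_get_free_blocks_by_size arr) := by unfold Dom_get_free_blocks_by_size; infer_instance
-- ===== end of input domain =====

-- B changes the decomposition: a prefix-sum table built in its own pass replaces A's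
-- threaded running accumulator (same O(n) cost; objective: alternative).

-- ===== PORT A =====
-- Python `buckets[idx].append(v)` on the length-10 bucket list: a negative idx counts
-- from the end. Exact for -10 ≤ idx < 10 (Python raises IndexError otherwise; Pre_ excludes that).
def pvBucketAppend (b : List (List Int)) (idx : Int) (v : Int) : List (List Int) :=
  let j : Nat := (if idx < 0 then idx + 10 else idx).toNat
  b.set j ((b.getD j []) ++ [v])

def get_free_blocks_by_size (arr : List Int) : List (List Int) :=
  ((PySem.List.pyRange 1 (arr.length : Int) 2).foldl
    (fun (st : List (List Int) × Int) i =>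
      let prev := PySem.List.pyGetD arr (i - 1) 0
      let curr := PySem.List.pyGetD arr i 0
      let s := st.2 + prev
      (pvBucketAppend st.1 curr s, s + curr))
    (List.replicate 10 ([] : List Int), 0)).1

-- ===== PORT B =====
-- `prefix[-1]` is ported as getLastD 0: prefix is never empty, so this is exact.
def get_free_blocks_by_size_alt (arr : List Int) : List (List Int) :=
  let pre := arr.foldl (fun p x => p ++ [p.getLastD 0 + x]) [(0 : Int)]
  (PySem.List.pyRange 1 (arr.length : Int) 2).foldl
    (fun b i => pvBucketAppend b (PySem.List.pyGetD arr i 0) (PySem.List.pyGetD pre i 0))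
    (List.replicate 10 ([] : List Int))

-- ===== PRECONDITION & SPEC =====
-- Pre_ excludes exactly the inputs on which Python A raises IndexError:
-- an entry at an odd position lying outside [-10, 10).
def Pre_get_free_blocks_by_size (arr : List Int) : Prop :=
  ∀ p ∈ arr.zipIdx, p.2 % 2 = 1 → -10 ≤ p.1 ∧ p.1 < 10
instance (arr : List Int) : Decidable (Pre_get_free_blocks_by_size arr) := by
  unfold Pre_get_free_blocks_by_size; infer_instance

def pvWitness_get_free_blocks_by_size : List Int := [1, 2, 3, 9]

def Spec_get_free_blocks_by_size (arr : List Int) (out : List (List Int)) : Prop := out = get_free_blocks_by_size_alt arr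
instance (arr : List Int) (out : List (List Int)) : Decidable (Spec_get_free_blocks_by_size arr out) := by unfold Spec_get_free_blocks_by_size; infer_instance

-- ===== CLAIM (what is proved, stated in full; the proofs are below) =====
def Claim_equal_get_free_blocks_by_size : Prop := ∀ (arr : List Int), Dom_get_free_blocks_by_size arr → Pre_get_free_blocks_by_size arr → Spec_get_free_blocks_by_size arr (get_free_blocks_by_size arr)

-- ===== LEMMAS AND PROOFS =====

-- Running sums starting from s: the values B's prefix pass appends after its seed.
def pvSums (s : Int) : List Int → List Int
  | [] => []
  | x :: t => (s + x) :: pvSums (s + x) t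

theorem pvPrefix_eq (xs : List Int) : ∀ (p : List Int) (s : Int), p.getLastD 0 = s →
    xs.foldl (fun p x => p ++ [p.getLastD 0 + x]) p = p ++ pvSums s xs := by
  induction xs with
  | nil => intro p s _; simp [pvSums]
  | cons x t ih =>
      intro p s hs
      simp only [List.foldl_cons, pvSums]
      rw [ih (p ++ [p.getLastD 0 + x]) (s + x) (by rw [List.getLastD_concat, hs]), hs]
      simp

theorem pvSums_getD (xs : List Int) : ∀ (s : Int) (k : Nat), k < xs.length →
    (pvSums s xs).getD k 0 = s + (xs.take (k + 1)).sum := by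
  induction xs with
  | nil => intro s k h; simp at h
  | cons x t ih =>
      intro s k h
      cases k with
      | zero => simp [pvSums]
      | succ k =>
          simp only [pvSums, List.getD_cons_succ, List.take_succ_cons, List.sum_cons]
          rw [ih (s + x) k (by simpa using h)]
          ring

theorem pvPrefix_getD (arr : List Int) (j : Nat) (hj : j ≤ arr.length) :
    (arr.foldl (fun p x => p ++ [p.getLastD 0 + x]) [(0 : Int)]).getD j 0 = (arr.take j).sum := by
  rw [pvPrefix_eq arr [(0 : Int)] 0 rfl]
  cases j with
  | zero => simp
  | succ j =>
      have hj' : j < arr.length := by omega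
      simp only [List.cons_append, List.nil_append, List.getD_cons_succ]
      rw [pvSums_getD arr 0 j hj']
      simp

theorem pvTake_sum_succ (xs : List Int) (k : Nat) (h : k < xs.length) :
    (xs.take (k + 1)).sum = (xs.take k).sum + xs.getD k 0 := by
  rw [List.getD_eq_getElem _ _ h]
  exact List.sum_take_succ xs k h

theorem pvMain (arr : List Int) (m : Nat) (hm : 2 * m ≤ arr.length) :
    (List.range m).foldl
      (fun (st : List (List Int) × Int) (k : Nat) =>
        let prev := PySem.List.pyGetD arr ((1 + 2 * (k : Int)) - 1) 0
        let curr := PySem.List.pyGetD arr (1 + 2 * (k : Int)) 0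
        let s := st.2 + prev
        (pvBucketAppend st.1 curr s, s + curr))
      (List.replicate 10 ([] : List Int), 0)
    = ((List.range m).foldl
        (fun b (k : Nat) => pvBucketAppend b (PySem.List.pyGetD arr (1 + 2 * (k : Int)) 0)
          (PySem.List.pyGetD (arr.foldl (fun p x => p ++ [p.getLastD 0 + x]) [(0 : Int)]) (1 + 2 * (k : Int)) 0))
        (List.replicate 10 ([] : List Int)),
       (arr.take (2 * m)).sum) := by
  induction m with
  | zero => simp
  | succ m ih =>
      have h2m : 2 * m ≤ arr.length := by omega
      rw [List.range_succ, List.foldl_append, List.foldl_append, ih h2m]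
      simp only [List.foldl_cons, List.foldl_nil]
      have h1 : PySem.List.pyGetD arr ((1 + 2 * (m : Int)) - 1) 0 = arr.getD (2 * m) 0 := by
        rw [PySem.List.pyGetD_of_nonneg arr 0 (by omega)]
        congr 1; omega
      have h2 : PySem.List.pyGetD arr (1 + 2 * (m : Int)) 0 = arr.getD (2 * m + 1) 0 := by
        rw [PySem.List.pyGetD_of_nonneg arr 0 (by omega)]
        congr 1; omega
      have h3 : PySem.List.pyGetD (arr.foldl (fun p x => p ++ [p.getLastD 0 + x]) [(0 : Int)]) (1 + 2 * (m : Int)) 0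
          = (arr.take (2 * m + 1)).sum := by
        rw [PySem.List.pyGetD_of_nonneg _ 0 (by omega)]
        have : ((1 : Int) + 2 * (m : Int)).toNat = 2 * m + 1 := by omega
        rw [this, pvPrefix_getD arr (2 * m + 1) (by omega)]
      have hv : (arr.take (2 * m)).sum + arr.getD (2 * m) 0 = (arr.take (2 * m + 1)).sum := by
        rw [pvTake_sum_succ arr (2 * m) (by omega)]
      have hv2 : (arr.take (2 * m + 1)).sum + arr.getD (2 * m + 1) 0 = (arr.take (2 * (m + 1))).sum := by
        rw [show 2 * (m + 1) = (2 * m + 1) + 1 by ring, pvTake_sum_succ arr (2 * m + 1) (by omega)]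
      simp only [h1, h2, h3, hv]
      refine Prod.ext rfl ?_
      simpa using hv2

-- ===== VERDICT (by name: the statement is the Claim_ definition above) =====
theorem get_free_blocks_by_size_spec : Claim_equal_get_free_blocks_by_size := by
  intro arr _ _
  unfold Spec_get_free_blocks_by_size get_free_blocks_by_size get_free_blocks_by_size_alt
  rw [PySem.List.pyRange_of_pos 1 (arr.length : Int) (by norm_num), List.foldl_map, List.foldl_map]
  set c : Nat := if (1 : Int) < (arr.length : Int) then (((arr.length : Int) - 1 + 2 - 1) / 2).toNat else 0 with hc
  have hcle : 2 * c ≤ arr.length := by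
    rw [hc]; split <;> omega
  have := pvMain arr c hcle
  exact congrArg Prod.fst this
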